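-- pv_equiv track=rewrite | github.com/Destiny0504/Chinese-word-segmentation | MCCWS/util/_dataset.py | load_testset
-- ===== SOURCE A (Python) =====
-- def load_testset(testset_token: list) -> dict:
--     """
-- ===================================================================================
--   Usage :
--                           This function is for loading the dataset which you are  \
--                           going to test on.
-- ===================================================================================
--   Input :
--
--   testset_token (list) :  The dataset's token are put in the list. In most cases, \
--                           each token represented a dataset, but [ALL] will load   \
--                           every dataset we have.
--
--   one_type (bool) :       This argument is for changing the dataset into          \
--                           traditional Chinese or simplified Chinese.
--
-- ===================================================================================
--   Output :
--                           A dictionary that stored the path of dataset which is   \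
--                           going to use for testing.
--
-- ===================================================================================
--   """
--     for token in testset_token:
--
--         assert token in [
--             "[AS]",
--             "[CIT]",
--             "[MSR]",
--             "[PKU]",
--             "[ALL]",
--             "[CTB6]",
--             "[SXU]",
--             "[UD]",
--             "[CNC]",
--             "[ZX]",
--             "[WTB]",
--             "[CTB6]",
--         ]
--
--     return_dict = {}
--
--     if "[MSR]" in testset_token or "[ALL]" in testset_token:
--         return_dict["[MSR]"] = ["./data/testset/msr_test.txt"]
--
--     if "[PKU]" in testset_token or "[ALL]" in testset_token:
--         return_dict["[PKU]"] = ["./data/testset/pku_test.txt"]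
--
--     if "[AS]" in testset_token or "[ALL]" in testset_token:
--         return_dict["[AS]"] = ["./data/testset/as_test.txt"]
--
--     if "[CIT]" in testset_token or "[ALL]" in testset_token:
--         return_dict["[CIT]"] = ["./data/testset/cityu_test.txt"]
--
--     if "[CTB6]" in testset_token or "[ALL]" in testset_token:
--         return_dict["[CTB6]"] = ["./data/testset/ctb6_test.txt"]
--
--     if "[CNC]" in testset_token or "[ALL]" in testset_token:
--         return_dict["[CNC]"] = ["./data/testset/cnc_test.txt"]
--
--     if "[SXU]" in testset_token or "[ALL]" in testset_token:
--         return_dict["[SXU]"] = ["./data/testset/sxu_test.txt"]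
--
--     if "[UD]" in testset_token or "[ALL]" in testset_token:
--         return_dict["[UD]"] = ["./data/testset/ud_test.txt"]
--
--     if "[WTB]" in testset_token or "[ALL]" in testset_token:
--         return_dict["[WTB]"] = ["./data/testset/wtb_test.txt"]
--
--     if "[ZX]" in testset_token or "[ALL]" in testset_token:
--         return_dict["[ZX]"] = ["./data/testset/zx_test.txt"]
--
--     if "[CTB6_T]" in testset_token or "[ALL]" in testset_token:
--         return_dict["[CTB6]"] = ["./data/testset/ctb6_test.txt"]
--
--     return return_dict
-- ===== SOURCE B (Python) =====
-- # One pass over the input accumulating a request bitmask, then one decode pass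
-- # over the fixed dataset table; no per-key membership scans of the input.
-- _BITS = {
--     "[MSR]": 1 << 0,
--     "[PKU]": 1 << 1,
--     "[AS]": 1 << 2,
--     "[CIT]": 1 << 3,
--     "[CTB6]": 1 << 4,
--     "[CNC]": 1 << 5,
--     "[SXU]": 1 << 6,
--     "[UD]": 1 << 7,
--     "[WTB]": 1 << 8,
--     "[ZX]": 1 << 9,
-- }
--
-- _ENTRIES = [
--     ("[MSR]", "./data/testset/msr_test.txt"),
--     ("[PKU]", "./data/testset/pku_test.txt"),
--     ("[AS]", "./data/testset/as_test.txt"),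
--     ("[CIT]", "./data/testset/cityu_test.txt"),
--     ("[CTB6]", "./data/testset/ctb6_test.txt"),
--     ("[CNC]", "./data/testset/cnc_test.txt"),
--     ("[SXU]", "./data/testset/sxu_test.txt"),
--     ("[UD]", "./data/testset/ud_test.txt"),
--     ("[WTB]", "./data/testset/wtb_test.txt"),
--     ("[ZX]", "./data/testset/zx_test.txt"),
-- ]
--
--
-- def load_testset(testset_token: list) -> dict:
--     mask = 0
--     for token in testset_token:
--         if token == "[ALL]":
--             mask = (1 << 10) - 1
--         else:
--             assert token in _BITS
--             mask |= _BITS[token]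
--     return_dict = {}
--     for i, (key, path) in enumerate(_ENTRIES):
--         if (mask >> i) & 1:
--             return_dict[key] = [path]
--     return return_dict
-- ===== Notes on version B (the rewrite author's own statement) =====
-- stated objective: alternative
-- what changed: Instead of A's eleven if-blocks each scanning the input for one token, B makes a single pass over the input accumulating a request bitmask (with '[ALL]' setting all bits), then decodes the bitmask over a fixed (token, path) table; under the assert's allow-list (Pre_) the dead '[CTB6_T]' branch never changes A's result.
import Mathlib
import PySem

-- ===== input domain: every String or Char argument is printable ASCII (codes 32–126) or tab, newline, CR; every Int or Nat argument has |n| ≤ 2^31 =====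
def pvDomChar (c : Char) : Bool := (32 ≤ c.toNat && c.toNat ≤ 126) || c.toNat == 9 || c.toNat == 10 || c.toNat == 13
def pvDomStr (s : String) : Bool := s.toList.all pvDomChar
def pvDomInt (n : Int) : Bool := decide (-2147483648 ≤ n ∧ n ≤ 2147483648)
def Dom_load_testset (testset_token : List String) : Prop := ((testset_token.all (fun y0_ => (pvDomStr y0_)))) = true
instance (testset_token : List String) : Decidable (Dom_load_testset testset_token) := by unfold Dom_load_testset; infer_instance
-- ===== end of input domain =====

-- B replaces A's eleven per-token membership scans by one pass over the input
-- building a request bitmask, then one decode pass over a fixed table; equal on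
-- Pre_ (all tokens pass A's assert).


-- ===== PORT A =====
-- Literal port of A's chain of if-blocks; the assert loop always passes under
-- Pre_load_testset, which excludes exactly the inputs where it raises.
def load_testset (testset_token : List String) : List (String × List String) :=
  let d : PySem.Dict String (List String) := PySem.Dict.empty
  let d := if testset_token.contains "[MSR]" || testset_token.contains "[ALL]" then
             PySem.Dict.insert d "[MSR]" ["./data/testset/msr_test.txt"] else d
  let d := if testset_token.contains "[PKU]" || testset_token.contains "[ALL]" then
             PySem.Dict.insert d "[PKU]" ["./data/testset/pku_test.txt"] else d
  let d := if testset_token.contains "[AS]" || testset_token.contains "[ALL]" then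
             PySem.Dict.insert d "[AS]" ["./data/testset/as_test.txt"] else d
  let d := if testset_token.contains "[CIT]" || testset_token.contains "[ALL]" then
             PySem.Dict.insert d "[CIT]" ["./data/testset/cityu_test.txt"] else d
  let d := if testset_token.contains "[CTB6]" || testset_token.contains "[ALL]" then
             PySem.Dict.insert d "[CTB6]" ["./data/testset/ctb6_test.txt"] else d
  let d := if testset_token.contains "[CNC]" || testset_token.contains "[ALL]" then
             PySem.Dict.insert d "[CNC]" ["./data/testset/cnc_test.txt"] else d
  let d := if testset_token.contains "[SXU]" || testset_token.contains "[ALL]" then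
             PySem.Dict.insert d "[SXU]" ["./data/testset/sxu_test.txt"] else d
  let d := if testset_token.contains "[UD]" || testset_token.contains "[ALL]" then
             PySem.Dict.insert d "[UD]" ["./data/testset/ud_test.txt"] else d
  let d := if testset_token.contains "[WTB]" || testset_token.contains "[ALL]" then
             PySem.Dict.insert d "[WTB]" ["./data/testset/wtb_test.txt"] else d
  let d := if testset_token.contains "[ZX]" || testset_token.contains "[ALL]" then
             PySem.Dict.insert d "[ZX]" ["./data/testset/zx_test.txt"] else d
  let d := if testset_token.contains "[CTB6_T]" || testset_token.contains "[ALL]" then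
             PySem.Dict.insert d "[CTB6]" ["./data/testset/ctb6_test.txt"] else d
  d.items

-- ===== PORT B =====
def pvBits : PySem.Dict String Nat :=
  PySem.Dict.ofList
    [ ("[MSR]", 1), ("[PKU]", 2), ("[AS]", 4), ("[CIT]", 8), ("[CTB6]", 16),
      ("[CNC]", 32), ("[SXU]", 64), ("[UD]", 128), ("[WTB]", 256), ("[ZX]", 512) ]

def pvEntries : List (String × String) :=
  [ ("[MSR]", "./data/testset/msr_test.txt"),
    ("[PKU]", "./data/testset/pku_test.txt"),
    ("[AS]", "./data/testset/as_test.txt"),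
    ("[CIT]", "./data/testset/cityu_test.txt"),
    ("[CTB6]", "./data/testset/ctb6_test.txt"),
    ("[CNC]", "./data/testset/cnc_test.txt"),
    ("[SXU]", "./data/testset/sxu_test.txt"),
    ("[UD]", "./data/testset/ud_test.txt"),
    ("[WTB]", "./data/testset/wtb_test.txt"),
    ("[ZX]", "./data/testset/zx_test.txt") ]

-- one step of B's first loop (the assert never fires under Pre_load_testset)
def pvMaskStep (m : Nat) (t : String) : Nat :=
  if t == "[ALL]" then 1023 else m ||| PySem.Dict.getD pvBits t 0

def load_testset_alt (testset_token : List String) : List (String × List String) :=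
  let mask := testset_token.foldl pvMaskStep 0
  ((PySem.List.enumerate pvEntries 0).foldl
    (fun d x => if ((mask >>> x.1.toNat) &&& 1) == 1
                then PySem.Dict.insert d x.2.1 [x.2.2] else d)
    (PySem.Dict.empty : PySem.Dict String (List String))).items

-- ===== PRECONDITION & SPEC =====
-- Pre_ excludes exactly the inputs on which A's assert raises AssertionError:
-- some token outside A's allow-list (note "[CTB6_T]" is NOT in it).
def Pre_load_testset (testset_token : List String) : Prop :=
  ∀ t ∈ testset_token,
    t ∈ ["[AS]", "[CIT]", "[MSR]", "[PKU]", "[ALL]", "[CTB6]", "[SXU]", "[UD]",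
         "[CNC]", "[ZX]", "[WTB]", "[CTB6]"]
instance (testset_token : List String) : Decidable (Pre_load_testset testset_token) := by
  unfold Pre_load_testset; infer_instance
def pvWitness_load_testset : List String := ["[MSR]", "[ALL]"]
def Spec_load_testset (testset_token : List String) (out : List (String × List String)) : Prop :=
  out = load_testset_alt testset_token
instance (testset_token : List String) (out : List (String × List String)) :
    Decidable (Spec_load_testset testset_token out) := by unfold Spec_load_testset; infer_instance

-- ===== CLAIM (what is proved, stated in full; the proofs are below) =====
def Claim_equal_load_testset : Prop :=
  ∀ (testset_token : List String), Dom_load_testset testset_token →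
    Pre_load_testset testset_token →
    Spec_load_testset testset_token (load_testset testset_token)

-- ===== LEMMAS AND PROOFS =====
def pvKeys : List String :=
  ["[MSR]", "[PKU]", "[AS]", "[CIT]", "[CTB6]", "[CNC]", "[SXU]", "[UD]", "[WTB]", "[ZX]"]

-- Python's truthiness test '(mask >> i) & 1' is the i-th bit
lemma pv_and1 (m i : Nat) : (((m >>> i) &&& 1) == 1) = m.testBit i := by
  simp [Nat.testBit, Nat.and_one_is_mod, Nat.one_and_eq_mod_two]

lemma pv_bit_le (t : String) : PySem.Dict.getD pvBits t 0 ≤ 1023 := by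
  rcases hf : pvBits.get? t with _ | v
  · simp [PySem.Dict.getD_eq_get?_getD, hf]
  · have hv : (t, v) ∈ pvBits.items := PySem.Dict.mem_items_of_get?_eq_some pvBits hf
    have hmk : pvBits.items
        = [("[MSR]", 1), ("[PKU]", 2), ("[AS]", 4), ("[CIT]", 8), ("[CTB6]", 16),
           ("[CNC]", 32), ("[SXU]", 64), ("[UD]", 128), ("[WTB]", 256), ("[ZX]", 512)] := by
      decide
    rw [hmk] at hv
    simp [Prod.ext_iff] at hv
    simp [PySem.Dict.getD_eq_get?_getD, hf]
    omega

lemma pv_testBit_1023 (i : Nat) : Nat.testBit 1023 i = decide (i < 10) := by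
  have := Nat.testBit_two_pow_sub_one 10 i
  norm_num at this ⊢
  omega

lemma pv_or_1023 (b : Nat) (hb : b ≤ 1023) : 1023 ||| b = 1023 := by
  apply Nat.eq_of_testBit_eq
  intro i
  rcases lt_or_ge i 10 with hi | hi
  · simp [Nat.testBit_or, pv_testBit_1023, hi]
  · have hb' : b < 2 ^ i := lt_of_le_of_lt hb (by
      calc (1023 : Nat) < 2 ^ 10 := by norm_num
        _ ≤ 2 ^ i := Nat.pow_le_pow_right (by norm_num) hi)
    simp [Nat.testBit_or, Nat.testBit_lt_two_pow hb', pv_testBit_1023, Nat.not_lt.mpr hi]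

lemma pv_fold_1023 (ts : List String) : ts.foldl pvMaskStep 1023 = 1023 := by
  induction ts with
  | nil => rfl
  | cons t rest ih =>
      simp only [List.foldl_cons, pvMaskStep]
      split_ifs
      · exact ih
      · rw [pv_or_1023 _ (pv_bit_le t)]; exact ih

lemma pv_mask_all (ts : List String) (m : Nat) (hm : m ≤ 1023)
    (h : "[ALL]" ∈ ts) : ts.foldl pvMaskStep m = 1023 := by
  induction ts generalizing m with
  | nil => cases h
  | cons t rest ih =>
      simp only [List.foldl_cons, pvMaskStep]
      by_cases ht : t = "[ALL]"
      · simp [ht, pv_fold_1023]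
      · simp only [beq_iff_eq, if_neg ht]
        have hrest : "[ALL]" ∈ rest := by
          rcases List.mem_cons.mp h with h' | h'
          · exact absurd h'.symm ht
          · exact h'
        have hle : m ||| PySem.Dict.getD pvBits t 0 ≤ 1023 := by
          have h1 : m < 2 ^ 10 := by omega
          have h2 : PySem.Dict.getD pvBits t 0 < 2 ^ 10 := by
            have := pv_bit_le t; omega
          have := Nat.or_lt_two_pow h1 h2
          omega
        exact ih _ hle hrest

lemma pv_mask_bit (ts : List String) (hpre : Pre_load_testset ts)
    (hall : "[ALL]" ∉ ts) (i : Nat) (hi : i < 10) :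
    ∀ m : Nat, (ts.foldl pvMaskStep m).testBit i
      = (m.testBit i || ts.contains (pvKeys.getD i "")) := by
  induction ts with
  | nil => intro m; simp
  | cons t rest ih =>
      intro m
      have hpre' : Pre_load_testset rest := fun x hx => hpre x (List.mem_cons_of_mem _ hx)
      have hall' : "[ALL]" ∉ rest := fun hx => hall (List.mem_cons_of_mem _ hx)
      have htne : t ≠ "[ALL]" := fun h => hall (h ▸ List.mem_cons_self ..)
      have htmem := hpre t (List.mem_cons_self ..)
      simp only [List.foldl_cons, pvMaskStep, beq_iff_eq, if_neg htne, List.contains_cons]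
      rw [ih hpre' hall', Nat.testBit_or]
      have hb : (PySem.Dict.getD pvBits t 0).testBit i = (pvKeys.getD i "" == t) := by
        simp only [List.mem_cons, List.not_mem_nil, or_false] at htmem
        rcases htmem with h | h | h | h | h | h | h | h | h | h | h | h <;>
          first
          | exact absurd h htne
          | (subst h; interval_cases i <;> decide)
      rw [hb, Bool.or_assoc]

-- ===== VERDICT (by name: the statement is the Claim_ definition above) =====
set_option maxHeartbeats 2000000 in
theorem load_testset_spec : Claim_equal_load_testset := by
  intro ts _ hpre
  unfold Spec_load_testset load_testset load_testset_alt
  have hT : "[CTB6_T]" ∉ ts := by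
    intro hm; have := hpre _ hm; simp at this
  have hTc : ts.contains "[CTB6_T]" = false := by simpa using hT
  by_cases hall : "[ALL]" ∈ ts
  · have hac : ts.contains "[ALL]" = true := by simpa using hall
    have hmask : ts.foldl pvMaskStep 0 = 1023 := pv_mask_all ts 0 (by norm_num) hall
    simp only [hac, Bool.or_true, hmask]
    decide
  · have hac : ts.contains "[ALL]" = false := by simpa using hall
    have hbit := pv_mask_bit ts hpre hall
    have h0 : (ts.foldl pvMaskStep 0).testBit 0 = ts.contains "[MSR]" := by
      simpa [pvKeys] using hbit 0 (by norm_num) 0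
    have h1 : (ts.foldl pvMaskStep 0).testBit 1 = ts.contains "[PKU]" := by
      simpa [pvKeys] using hbit 1 (by norm_num) 0
    have h2 : (ts.foldl pvMaskStep 0).testBit 2 = ts.contains "[AS]" := by
      simpa [pvKeys] using hbit 2 (by norm_num) 0
    have h3 : (ts.foldl pvMaskStep 0).testBit 3 = ts.contains "[CIT]" := by
      simpa [pvKeys] using hbit 3 (by norm_num) 0
    have h4 : (ts.foldl pvMaskStep 0).testBit 4 = ts.contains "[CTB6]" := by
      simpa [pvKeys] using hbit 4 (by norm_num) 0
    have h5 : (ts.foldl pvMaskStep 0).testBit 5 = ts.contains "[CNC]" := by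
      simpa [pvKeys] using hbit 5 (by norm_num) 0
    have h6 : (ts.foldl pvMaskStep 0).testBit 6 = ts.contains "[SXU]" := by
      simpa [pvKeys] using hbit 6 (by norm_num) 0
    have h7 : (ts.foldl pvMaskStep 0).testBit 7 = ts.contains "[UD]" := by
      simpa [pvKeys] using hbit 7 (by norm_num) 0
    have h8 : (ts.foldl pvMaskStep 0).testBit 8 = ts.contains "[WTB]" := by
      simpa [pvKeys] using hbit 8 (by norm_num) 0
    have h9 : (ts.foldl pvMaskStep 0).testBit 9 = ts.contains "[ZX]" := by
      simpa [pvKeys] using hbit 9 (by norm_num) 0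
    simp only [pvEntries, PySem.List.enumerate_cons, PySem.List.enumerate_nil,
      List.foldl_cons, List.foldl_nil]
    simp only [pv_and1]
    norm_num
    have h0' := h0
    rw [Nat.testBit_zero] at h0'
    simp only [List.contains_eq_mem] at h0'
    have h0m : (List.foldl pvMaskStep 0 ts % 2 = 1) = ("[MSR]" ∈ ts) :=
      propext (decide_eq_decide.mp h0')
    simp [h0m, h1, h2, h3, h4, h5, h6, h7, h8, h9, hall, hT, List.contains_eq_mem]
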